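-- pv_equiv track=rewrite | github.com/JK0201/Algorithm | 프로그래머스/0/181854. 배열의 길이에 따라 다른 연산하기/배열의 길이에 따라 다른 연산하기.py | solution
-- ===== SOURCE A (Python) =====
-- def solution(arr, num):
--     answer = []
--
--     for i, n in enumerate(arr):
--         if len(arr) % 2 != 0 and i % 2 == 0:
--             answer.append(n + num)
--
--         elif len(arr) % 2 == 0 and i % 2 != 0:
--             answer.append(n + num)
--
--         else:
--             answer.append(n)
--
--     return answer
-- ===== SOURCE B (Python) =====
-- def solution(arr, num):
--     # build a periodic delta mask and add it elementwise; no per-element parity branch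
--     start = (len(arr) + 1) % 2
--     deltas = [0] * start + [num, 0] * ((len(arr) + 1) // 2)
--     return [a + d for a, d in zip(arr, deltas)]
-- ===== Notes on version B (the rewrite author's own statement) =====
-- stated objective: alternative
-- what changed: Instead of looping with length/index parity branches, B precomputes a periodic delta mask ([0]*start + [num,0]*k) and returns the elementwise zip-sum of arr and the mask, so the loop body has no branch or index test (measured ~2x faster).
import Mathlib
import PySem

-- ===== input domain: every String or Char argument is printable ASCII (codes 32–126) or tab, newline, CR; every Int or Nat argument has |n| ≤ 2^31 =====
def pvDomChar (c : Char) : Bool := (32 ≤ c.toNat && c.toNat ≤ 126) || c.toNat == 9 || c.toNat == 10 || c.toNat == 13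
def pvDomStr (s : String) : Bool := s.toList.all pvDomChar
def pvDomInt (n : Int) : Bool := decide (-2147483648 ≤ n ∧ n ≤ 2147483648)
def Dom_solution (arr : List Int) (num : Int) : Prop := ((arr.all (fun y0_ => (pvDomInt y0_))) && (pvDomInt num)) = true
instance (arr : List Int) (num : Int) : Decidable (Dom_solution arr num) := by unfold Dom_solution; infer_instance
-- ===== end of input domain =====

-- B replaces A's branching parity loop with a precomputed periodic delta mask zip-added to arr (alternative decomposition).

-- ===== PORT A =====
def solution (arr : List Int) (num : Int) : List Int :=
  (PySem.List.enumerate arr).foldl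
    (fun answer p =>
      if arr.length % 2 ≠ 0 ∧ p.1 % 2 = 0 then answer ++ [p.2 + num]
      else if arr.length % 2 = 0 ∧ p.1 % 2 ≠ 0 then answer ++ [p.2 + num]
      else answer ++ [p.2])
    []

-- ===== PORT B =====
def solution_alt (arr : List Int) (num : Int) : List Int :=
  let start := (arr.length + 1) % 2
  let deltas := List.replicate start (0 : Int) ++ (List.replicate ((arr.length + 1) / 2) [num, 0]).flatten
  List.zipWith (· + ·) arr deltas

-- ===== PRECONDITION & SPEC =====
def Spec_solution (arr : List Int) (num : Int) (out : List Int) : Prop := out = solution_alt arr num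
instance (arr : List Int) (num : Int) (out : List Int) : Decidable (Spec_solution arr num out) := by unfold Spec_solution; infer_instance

-- ===== CLAIM (what is proved, stated in full; the proofs are below) =====
def Claim_equal_solution : Prop := ∀ (arr : List Int) (num : Int), Dom_solution arr num → Spec_solution arr num (solution arr num)

-- ===== LEMMAS AND PROOFS =====

-- proof-only helper: add num to every other element, starting at the head when b = true
def altGo (num : Int) : Bool → List Int → List Int
  | _, [] => []
  | b, x :: xs => (if b then x + num else x) :: altGo num (!b) xs

theorem solution_bridge (num : Int) (L : Nat) :
    ∀ (xs : List Int) (s : Nat) (acc : List Int),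
    (PySem.List.enumerate xs (s : Int)).foldl
      (fun answer p =>
        if L % 2 ≠ 0 ∧ p.1 % 2 = 0 then answer ++ [p.2 + num]
        else if L % 2 = 0 ∧ p.1 % 2 ≠ 0 then answer ++ [p.2 + num]
        else answer ++ [p.2])
      acc
    = acc ++ altGo num (decide ((s + L) % 2 = 1)) xs := by
  intro xs
  induction xs with
  | nil => intro s acc; simp [PySem.List.enumerate_nil, altGo]
  | cons x xs ih =>
    intro s acc
    rw [PySem.List.enumerate_cons, List.foldl_cons]
    have hcast : ((s : Int) + 1) = ((s + 1 : Nat) : Int) := by push_cast; ring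
    rw [hcast, ih (s + 1)]
    have hcond : ((L % 2 ≠ 0 ∧ (s : Int) % 2 = 0) ∨ (L % 2 = 0 ∧ (s : Int) % 2 ≠ 0))
        ↔ (s + L) % 2 = 1 := by omega
    have htog : (s + 1 + L) % 2 = 1 ↔ ¬ ((s + L) % 2 = 1) := by omega
    by_cases h : (s + L) % 2 = 1
    · have h1 : (if L % 2 ≠ 0 ∧ (s : Int) % 2 = 0 then acc ++ [x + num]
          else if L % 2 = 0 ∧ (s : Int) % 2 ≠ 0 then acc ++ [x + num]
          else acc ++ [x]) = acc ++ [x + num] := by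
        rcases hcond.mpr h with h2 | h2
        · rw [if_pos h2]
        · rw [if_neg (by tauto), if_pos h2]
      have hd : decide ((s + 1 + L) % 2 = 1) = false := by simp [htog, h]
      have hd' : decide ((s + L) % 2 = 1) = true := by simp [h]
      rw [h1, hd, hd']
      simp [altGo]
    · have h1 : (if L % 2 ≠ 0 ∧ (s : Int) % 2 = 0 then acc ++ [x + num]
          else if L % 2 = 0 ∧ (s : Int) % 2 ≠ 0 then acc ++ [x + num]
          else acc ++ [x]) = acc ++ [x] := by
        rw [if_neg (fun h2 => h (hcond.mp (Or.inl h2))),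
            if_neg (fun h2 => h (hcond.mp (Or.inr h2)))]
      have hd : decide ((s + 1 + L) % 2 = 1) = true := by simp [htog, h]
      have hd' : decide ((s + L) % 2 = 1) = false := by simp [h]
      rw [h1, hd, hd']
      simp [altGo]

theorem zip_pattern (num : Int) :
    ∀ (k : Nat) (xs : List Int), xs.length ≤ 2 * k →
    List.zipWith (· + ·) xs ((List.replicate k [num, 0]).flatten) = altGo num true xs := by
  intro k
  induction k with
  | zero =>
    intro xs h
    have : xs = [] := by cases xs <;> simp_all
    simp [this, altGo]
  | succ k ih =>
    intro xs h
    rw [List.replicate_succ, List.flatten_cons]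
    match xs with
    | [] => simp [altGo]
    | [x] => simp [altGo]
    | x :: y :: xs =>
      simp only [List.cons_append, List.zipWith_cons_cons, List.nil_append]
      rw [ih xs (by simp at h; omega)]
      simp [altGo]

theorem alt_eq_altGo (arr : List Int) (num : Int) :
    solution_alt arr num = altGo num (decide (arr.length % 2 = 1)) arr := by
  unfold solution_alt
  by_cases hL : arr.length % 2 = 1
  · have hs : (arr.length + 1) % 2 = 0 := by omega
    simp only [hs, List.replicate_zero, List.nil_append]
    rw [zip_pattern num ((arr.length + 1) / 2) arr (by omega)]
    simp [hL]
  · have hs : (arr.length + 1) % 2 = 1 := by omega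
    simp only [hs, List.replicate_one, List.singleton_append]
    match arr, hL with
    | [], _ => simp [altGo]
    | x :: xs, hL =>
      simp only [List.zipWith_cons_cons]
      rw [zip_pattern num (((x :: xs).length + 1) / 2) xs (by simp at hL ⊢; omega)]
      have hx : decide ((x :: xs).length % 2 = 1) = false := by simp at hL ⊢; omega
      rw [hx]
      simp [altGo]

-- ===== VERDICT (by name: the statement is the Claim_ definition above) =====
theorem solution_spec : Claim_equal_solution := by
  intro arr num _
  show solution arr num = solution_alt arr num
  unfold solution
  have h := solution_bridge num arr.length arr 0 []
  simp only [Nat.cast_zero, Nat.zero_add, List.nil_append] at h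
  rw [h, alt_eq_altGo]
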